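-- pv_equiv track=rewrite | github.com/Tay-Son/GH_CT | Algorithm/PRG-Completed/PRG 049995.py | solution
-- ===== SOURCE A (Python) =====
-- def solution(lst_cookie):
--     N_ = len(lst_cookie)
--     max_ = 0
--     max_sum_l = 0
--     for ptr_m in range(1, N_):
--         sum_l = 0
--         max_sum_l += lst_cookie[ptr_m - 1]
--         set_ = set()
--         sum_r = 0
--         ptr_r = ptr_m
--         while sum_r < max_sum_l and ptr_r < N_:
--             sum_r += lst_cookie[ptr_r]
--             set_.add(sum_r)
--             ptr_r += 1
--
--         for ptr_l in range(ptr_m - 1, -1, -1):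
--             sum_l += lst_cookie[ptr_l]
--             if sum_l > max_:
--                 if sum_l in set_:
--                     max_ = sum_l
--
--     return max_
-- ===== SOURCE B (Python) =====
-- def solution(lst_cookie):
--     # Role-swapped rewrite on precomputed prefix sums: a growing set of LEFT prefix
--     # values replaces A's per-split rebuilt right-sum set; same truncated right scan.
--     N = len(lst_cookie)
--     pref = [0]
--     for x in lst_cookie:
--         pref.append(pref[-1] + x)
--     best = 0
--     left = set()
--     for m in range(1, N):
--         left.add(pref[m - 1])
--         cutoff = 2 * pref[m]
--         r = m
--         while pref[r] < cutoff and r < N: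
--             r += 1
--             s = pref[r] - pref[m]
--             if s > best and cutoff - pref[r] in left:
--                 best = s
--     return best
-- ===== Notes on version B (the rewrite author's own statement) =====
-- stated objective: alternative
-- what changed: B precomputes the prefix-sum array once and swaps the roles of A's two inner scans: a single incrementally-grown set of left prefix values (O(1) per split point) replaces A's per-split rebuilt right-sum set, and the remaining scan runs over the truncated right range instead of over all left segments.
import Mathlib
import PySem

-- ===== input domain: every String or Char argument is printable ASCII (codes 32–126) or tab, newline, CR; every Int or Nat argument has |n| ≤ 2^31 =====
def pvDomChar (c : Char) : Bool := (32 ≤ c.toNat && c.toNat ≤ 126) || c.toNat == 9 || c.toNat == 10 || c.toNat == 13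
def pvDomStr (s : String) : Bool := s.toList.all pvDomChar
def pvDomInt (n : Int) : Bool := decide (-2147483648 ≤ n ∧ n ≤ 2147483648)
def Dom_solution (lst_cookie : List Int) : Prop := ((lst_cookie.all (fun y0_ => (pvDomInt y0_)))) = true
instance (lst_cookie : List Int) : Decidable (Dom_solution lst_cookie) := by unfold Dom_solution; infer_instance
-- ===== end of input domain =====

-- B swaps the roles of A's two inner scans, over precomputed prefix sums: one incrementally grown
-- set of left-prefix values replaces A's per-split rebuilt right-sum set.

-- ===== PORT A =====
-- the `while sum_r < max_sum_l and ptr_r < N` loop of A, accumulating right sums into the set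
def solutionWhileA (lst : List Int) (N maxSumL sumR ptrR : Int) (st : PySem.Set Int) : PySem.Set Int :=
  if h : sumR < maxSumL ∧ ptrR < N then
    let sumR' := sumR + PySem.List.pyGetD lst ptrR 0
    solutionWhileA lst N maxSumL sumR' (ptrR + 1) (PySem.Set.add st sumR')
  else st
termination_by (N - ptrR).toNat
decreasing_by omega

def solution (lst_cookie : List Int) : Int :=
  let N : Int := (lst_cookie.length : Int)
  ((PySem.List.pyRange 1 N 1).foldl (fun (st : Int × Int) ptrM =>
      let maxSumL := st.2 + PySem.List.pyGetD lst_cookie (ptrM - 1) 0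
      let set_ := solutionWhileA lst_cookie N maxSumL 0 ptrM PySem.Set.empty
      let inner := (PySem.List.pyRange (ptrM - 1) (-1) (-1)).foldl
          (fun (p : Int × Int) ptrL =>
            let sumL := p.1 + PySem.List.pyGetD lst_cookie ptrL 0
            (sumL, if sumL > p.2 ∧ PySem.Set.contains set_ sumL then sumL else p.2))
          (0, st.1)
      (inner.2, maxSumL)) ((0 : Int), (0 : Int))).1

-- ===== PORT B =====
-- the `while pref[r] < cutoff and r < N` loop of B, updating the running best in place
def solutionAltWhile (pref : List Int) (N cutoff pm : Int) (left : PySem.Set Int) (best r : Int) : Int :=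
  if h : PySem.List.pyGetD pref r 0 < cutoff ∧ r < N then
    let s := PySem.List.pyGetD pref (r + 1) 0 - pm
    solutionAltWhile pref N cutoff pm left
      (if s > best ∧ PySem.Set.contains left (cutoff - PySem.List.pyGetD pref (r + 1) 0) then s else best)
      (r + 1)
  else best
termination_by (N - r).toNat
decreasing_by omega

def solution_alt (lst_cookie : List Int) : Int :=
  let N : Int := (lst_cookie.length : Int)
  let pref := lst_cookie.foldl (fun acc x => acc ++ [PySem.List.pyGetD acc (-1) 0 + x]) [(0 : Int)]
  ((PySem.List.pyRange 1 N 1).foldl (fun (st : PySem.Set Int × Int) m =>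
      let left := PySem.Set.add st.1 (PySem.List.pyGetD pref (m - 1) 0)
      let cutoff := 2 * PySem.List.pyGetD pref m 0
      (left, solutionAltWhile pref N cutoff (PySem.List.pyGetD pref m 0) left st.2 m))
      ((PySem.Set.empty : PySem.Set Int), (0 : Int))).2

-- ===== PRECONDITION & SPEC =====
def Spec_solution (lst_cookie : List Int) (out : Int) : Prop := out = solution_alt lst_cookie
instance (lst_cookie : List Int) (out : Int) : Decidable (Spec_solution lst_cookie out) := by unfold Spec_solution; infer_instance

-- ===== CLAIM (what is proved, stated in full; the proofs are below) =====
def Claim_equal_solution : Prop := ∀ (lst_cookie : List Int), Dom_solution lst_cookie → Spec_solution lst_cookie (solution lst_cookie)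

-- ===== LEMMAS AND PROOFS =====

def psum (lst : List Int) (k : Int) : Int := (lst.take k.toNat).sum

lemma getD_psum (lst : List Int) (r : Int) (h0 : 0 ≤ r) (h1 : r < (lst.length : Int)) :
    PySem.List.pyGetD lst r 0 = psum lst (r + 1) - psum lst r := by
  rw [PySem.List.pyGetD_eq_getElem lst 0 h0 h1]
  have hr : (r + 1).toNat = r.toNat + 1 := by omega
  have hlt : r.toNat < lst.length := by omega
  rw [psum, psum, hr, List.sum_take_succ lst r.toNat hlt]
  ring

def prefB (lst : List Int) : List Int :=
  lst.foldl (fun acc x => acc ++ [PySem.List.pyGetD acc (-1) 0 + x]) [(0 : Int)]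

lemma pyGetD_neg_one (xs : List Int) (h : xs ≠ []) :
    PySem.List.pyGetD xs (-1) 0 = xs.getLast h := by
  have hl : 1 ≤ xs.length := by cases xs <;> simp_all
  simp only [PySem.List.pyGetD, PySem.List.pyGet?, PySem.List.pyIdx?]
  norm_num [hl]
  rw [List.getElem?_eq_getElem (by omega)]
  simp [List.getLast_eq_getElem]

lemma prefB_eq (lst : List Int) :
    prefB lst = (List.range (lst.length + 1)).map (fun j : Nat => psum lst (j : Int)) := by
  unfold prefB
  induction lst using List.reverseRecOn with
  | nil => simp [psum]
  | append_singleton ys x ih =>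
    rw [List.foldl_append, ih]
    have hne : (List.range (ys.length + 1)).map (fun j : Nat => psum ys (j : Int)) ≠ [] := by
      apply List.ne_nil_of_length_pos; simp
    rw [List.foldl_cons, List.foldl_nil, pyGetD_neg_one _ hne]
    have hlast : ((List.range (ys.length + 1)).map (fun j : Nat => psum ys (j : Int))).getLast hne = ys.sum := by
      rw [List.getLast_eq_getElem]
      simp only [List.length_map, List.length_range, List.getElem_map, List.getElem_range]
      simp [psum, List.take_of_length_le (le_refl ys.length)]
    rw [hlast]
    rw [List.length_append, List.length_singleton, List.range_succ (n := ys.length + 1), List.map_append]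
    congr 1
    · apply List.map_congr_left
      intro j hj
      simp only [List.mem_range] at hj
      simp [psum, List.take_append_of_le_length (by omega : j ≤ ys.length)]
    · simp only [List.map_cons, List.map_nil, List.cons.injEq, and_true]
      rw [psum, List.take_of_length_le (by simp : (ys ++ [x]).length ≤ ((ys.length + 1 : Nat) : Int).toNat)]
      simp

lemma getPref (lst : List Int) (k : Int) (h0 : 0 ≤ k) (h1 : k ≤ (lst.length : Int)) :
    PySem.List.pyGetD (prefB lst) k 0 = psum lst k := by
  rw [prefB_eq]
  rw [PySem.List.pyGetD_eq_getElem _ 0 h0 (by simp; omega)]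
  rw [List.getElem_map, List.getElem_range]
  congr 1
  omega
lemma condmax_eq_filter (p : Int → Bool) : ∀ (L : List Int) (b : Int),
    L.foldl (fun b v => if v > b ∧ p v then v else b) b = (L.filter p).foldl max b := by
  intro L
  induction L with
  | nil => intro b; rfl
  | cons v L ih =>
    intro b
    by_cases hp : p v
    · have hv : (if v > b ∧ p v then v else b) = max b v := by
        split_ifs with h
        · omega
        · simp only [hp, and_true] at h; omega
      rw [List.foldl_cons, List.filter_cons, if_pos hp, hv, List.foldl_cons, ih]
    · rw [List.foldl_cons, if_neg (by simp [hp]), List.filter_cons, if_neg (by simp [hp]), ih]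

lemma maxfold_congr (L1 L2 : List Int) (b : Int) (h : ∀ x, x ∈ L1 ↔ x ∈ L2) :
    L1.foldl max b = L2.foldl max b := by
  apply le_antisymm
  · rcases PySem.List.foldl_max_mem L1 b with h1 | h1
    · rw [h1]; exact (PySem.List.le_foldl_max L2 b).1
    · exact (PySem.List.le_foldl_max L2 b).2 _ ((h _).1 h1)
  · rcases PySem.List.foldl_max_mem L2 b with h1 | h1
    · rw [h1]; exact (PySem.List.le_foldl_max L1 b).1
    · exact (PySem.List.le_foldl_max L1 b).2 _ ((h _).2 h1)

lemma condmax_swap (L1 L2 : List Int) (p1 p2 : Int → Bool) (b : Int)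
    (h1 : ∀ v, p1 v = true ↔ v ∈ L2) (h2 : ∀ v, p2 v = true ↔ v ∈ L1) :
    L1.foldl (fun b v => if v > b ∧ p1 v then v else b)  b
      = L2.foldl (fun b v => if v > b ∧ p2 v then v else b) b := by
  rw [condmax_eq_filter, condmax_eq_filter]
  apply maxfold_congr
  intro x
  simp only [List.mem_filter, h1, h2]
  tauto

def rseq (lst : List Int) (m r : Int) : List Int :=
  if h : psum lst r - psum lst m < psum lst m ∧ r < (lst.length : Int) then
    (r + 1) :: rseq lst m (r + 1)
  else []
termination_by ((lst.length : Int) - r).toNat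
decreasing_by omega

lemma whileA_eq (lst : List Int) : ∀ (k : Nat) (m r : Int) (S : PySem.Set Int), 0 ≤ r →
    (((lst.length : Int) - r).toNat = k) →
    solutionWhileA lst (lst.length : Int) (psum lst m) (psum lst r - psum lst m) r S
      = PySem.Set.update S ((rseq lst m r).map (fun r' => psum lst r' - psum lst m)) := by
  intro k
  induction k with
  | zero =>
    intro m r S h0 hk
    rw [solutionWhileA, rseq]
    rw [dif_neg (by omega), dif_neg (by omega)]
    rfl
  | succ k ih =>
    intro m r S h0 hk
    rw [solutionWhileA, rseq]
    by_cases hc : psum lst r - psum lst m < psum lst m ∧ r < (lst.length : Int)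
    · rw [dif_pos hc, dif_pos hc]
      simp only []
      have hg : PySem.List.pyGetD lst r 0 = psum lst (r + 1) - psum lst r :=
        getD_psum lst r h0 hc.2
      rw [hg]
      have hs : psum lst r - psum lst m + (psum lst (r + 1) - psum lst r)
          = psum lst (r + 1) - psum lst m := by ring
      rw [hs]
      rw [ih m (r + 1) _ (by omega) (by omega)]
      rfl
    · rw [dif_neg hc, dif_neg hc]; rfl

lemma whileB_eq (lst : List Int) : ∀ (k : Nat) (m r best : Int) (left : PySem.Set Int),
    0 ≤ r → r ≤ (lst.length : Int) → (((lst.length : Int) - r).toNat = k) →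
    solutionAltWhile (prefB lst) (lst.length : Int) (2 * psum lst m) (psum lst m) left best r
      = ((rseq lst m r).map (fun r' => psum lst r' - psum lst m)).foldl
          (fun b v => if v > b ∧ PySem.Set.contains left (psum lst m - v) then v else b) best := by
  intro k
  induction k with
  | zero =>
    intro m r best left h0 hle hk
    rw [solutionAltWhile, rseq]
    rw [dif_neg (by omega), dif_neg (by omega)]
    rfl
  | succ k ih =>
    intro m r best left h0 hle hk
    rw [solutionAltWhile, rseq]
    have hgr : PySem.List.pyGetD (prefB lst) r 0 = psum lst r := getPref lst r h0 hle
    by_cases hc : psum lst r - psum lst m < psum lst m ∧ r < (lst.length : Int)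
    · rw [dif_pos (by rw [hgr]; exact ⟨by omega, hc.2⟩), dif_pos hc]
      simp only []
      have hgr1 : PySem.List.pyGetD (prefB lst) (r + 1) 0 = psum lst (r + 1) :=
        getPref lst (r + 1) (by omega) (by omega)
      rw [hgr1]
      have h2 : 2 * psum lst m - psum lst (r + 1) = psum lst m - (psum lst (r + 1) - psum lst m) := by ring
      rw [h2]
      rw [ih m (r + 1) _ left (by omega) (by omega) (by omega)]
      rfl
    · rw [dif_neg (by rw [hgr]; intro hcon; exact hc ⟨by omega, hcon.2⟩), dif_neg hc]
      rfl

lemma innerA_eq (lst : List Int) (S : PySem.Set Int) (m : Int) : ∀ (k : Nat) (l0 : Int),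
    l0 < (lst.length : Int) → ((l0 + 1).toNat = k) → ∀ (mx : Int),
    ((PySem.List.pyRange l0 (-1) (-1)).foldl
        (fun (p : Int × Int) l =>
          let sumL := p.1 + PySem.List.pyGetD lst l 0
          (sumL, if sumL > p.2 ∧ PySem.Set.contains S sumL then sumL else p.2))
        (psum lst m - psum lst (l0 + 1), mx)).2
      = ((PySem.List.pyRange l0 (-1) (-1)).map (fun l => psum lst m - psum lst l)).foldl
          (fun b v => if v > b ∧ PySem.Set.contains S v then v else b) mx := by
  intro k
  induction k with
  | zero =>
    intro l0 hlen hk mx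
    rw [PySem.List.pyRange_neg_one_eq_nil (by omega)]
    rfl
  | succ k ih =>
    intro l0 hlen hk mx
    rw [PySem.List.pyRange_neg_one_cons (by omega : (-1:Int) < l0)]
    simp only [List.foldl_cons, List.map_cons]
    have hg : PySem.List.pyGetD lst l0 0 = psum lst (l0 + 1) - psum lst l0 :=
      getD_psum lst l0 (by omega) hlen
    have hsum : psum lst m - psum lst (l0 + 1) + PySem.List.pyGetD lst l0 0
        = psum lst m - psum lst l0 := by rw [hg]; ring
    simp only [hsum]
    have := ih (l0 - 1) (by omega) (by omega)
      (if psum lst m - psum lst l0 > mx ∧ PySem.Set.contains S (psum lst m - psum lst l0)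
         then psum lst m - psum lst l0 else mx)
    have h1 : l0 - 1 + 1 = l0 := by ring
    rw [h1] at this
    exact this

lemma outer_eq (lst : List Int) : ∀ (k : Nat) (m0 : Int), 1 ≤ m0 →
    (((lst.length : Int) - m0).toNat = k) → ∀ (mx : Int) (left : PySem.Set Int),
    (∀ x, x ∈ left ↔ ∃ l : Int, 0 ≤ l ∧ l + 2 ≤ m0 ∧ x = psum lst l) →
    ((PySem.List.pyRange m0 (lst.length : Int) 1).foldl (fun (st : Int × Int) ptrM =>
        let maxSumL := st.2 + PySem.List.pyGetD lst (ptrM - 1) 0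
        let set_ := solutionWhileA lst (lst.length : Int) maxSumL 0 ptrM PySem.Set.empty
        let inner := (PySem.List.pyRange (ptrM - 1) (-1) (-1)).foldl
            (fun (p : Int × Int) ptrL =>
              let sumL := p.1 + PySem.List.pyGetD lst ptrL 0
              (sumL, if sumL > p.2 ∧ PySem.Set.contains set_ sumL then sumL else p.2))
            (0, st.1)
        (inner.2, maxSumL)) (mx, psum lst (m0 - 1))).1
    = ((PySem.List.pyRange m0 (lst.length : Int) 1).foldl (fun (st : PySem.Set Int × Int) m =>
        let left := PySem.Set.add st.1 (PySem.List.pyGetD (prefB lst) (m - 1) 0)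
        let cutoff := 2 * PySem.List.pyGetD (prefB lst) m 0
        (left, solutionAltWhile (prefB lst) (lst.length : Int) cutoff
          (PySem.List.pyGetD (prefB lst) m 0) left st.2 m)) (left, mx)).2 := by
  intro k
  induction k with
  | zero =>
    intro m0 h1 hk mx left hleft
    rw [PySem.List.pyRange_one_eq_nil (by omega)]
    rfl
  | succ k ih =>
    intro m0 h1 hk mx left hleft
    have hml : m0 < (lst.length : Int) := by omega
    rw [PySem.List.pyRange_one_cons hml, List.foldl_cons, List.foldl_cons]
    simp only []
    have e1 : m0 - 1 + 1 = m0 := by ring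
    rw [getD_psum lst (m0 - 1) (by omega) (by omega), e1]
    have e2 : psum lst (m0 - 1) + (psum lst m0 - psum lst (m0 - 1)) = psum lst m0 := by ring
    rw [e2]
    rw [getPref lst (m0 - 1) (by omega) (by omega), getPref lst m0 (by omega) (by omega)]
    set L2 := (rseq lst m0 m0).map (fun r' => psum lst r' - psum lst m0) with hL2
    set L1 := (PySem.List.pyRange (m0 - 1) (-1) (-1)).map (fun l => psum lst m0 - psum lst l) with hL1
    set left' := PySem.Set.add left (psum lst (m0 - 1)) with hleft'def
    -- A's set
    have hset : solutionWhileA lst (lst.length : Int) (psum lst m0) 0 m0 PySem.Set.empty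
        = PySem.Set.update PySem.Set.empty L2 := by
      have := whileA_eq lst ((lst.length : Int) - m0).toNat m0 m0 PySem.Set.empty (by omega) rfl
      simpa using this
    simp only [hset]
    -- A's inner loop
    have hinner := innerA_eq lst (PySem.Set.update PySem.Set.empty L2) m0 (m0 - 1 + 1).toNat
      (m0 - 1) (by omega) rfl mx
    rw [e1] at hinner
    simp only [sub_self] at hinner
    rw [hinner]
    -- B's while loop
    have hB := whileB_eq lst ((lst.length : Int) - m0).toNat m0 m0 mx left' (by omega) (by omega) rfl
    rw [hB]
    -- swap the two conditional folds
    have hmemL' : ∀ x, x ∈ left' ↔ ∃ l : Int, 0 ≤ l ∧ l + 2 ≤ m0 + 1 ∧ x = psum lst l := by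
      intro x
      rw [hleft'def, PySem.Set.mem_add]
      constructor
      · rintro (hx | hx)
        · obtain ⟨l, a, b, c⟩ := (hleft x).1 hx
          exact ⟨l, a, by omega, c⟩
        · exact ⟨m0 - 1, by omega, by omega, hx⟩
      · rintro ⟨l, a, b, rfl⟩
        by_cases hc : l + 2 ≤ m0
        · exact Or.inl ((hleft _).2 ⟨l, a, hc, rfl⟩)
        · have : l = m0 - 1 := by omega
          subst this
          exact Or.inr rfl
    have hswap : L1.foldl (fun b v => if v > b ∧
          PySem.Set.contains (PySem.Set.update PySem.Set.empty L2) v then v else b) mx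
        = L2.foldl (fun b v => if v > b ∧
          PySem.Set.contains left' (psum lst m0 - v) then v else b) mx := by
      apply condmax_swap
      · intro v
        rw [PySem.Set.contains_iff]
        exact PySem.Set.mem_ofList L2 v
      · intro v
        rw [PySem.Set.contains_iff, hmemL' _]
        rw [hL1]
        simp only [List.mem_map, PySem.List.mem_pyRange_neg_one]
        constructor
        · rintro ⟨l, a, b, hv⟩
          exact ⟨l, ⟨by omega, by omega⟩, by omega⟩
        · rintro ⟨l, ⟨a, b⟩, rfl⟩
          exact ⟨l, by omega, by omega, by ring⟩
    rw [hswap]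
    have := ih (m0 + 1) (by omega) (by omega)
      (L2.foldl (fun b v => if v > b ∧ PySem.Set.contains left' (psum lst m0 - v) then v else b) mx)
      left' hmemL'
    rw [show m0 + 1 - 1 = m0 from by ring] at this
    exact this

-- ===== VERDICT (by name: the statement is the Claim_ definition above) =====
theorem solution_spec : Claim_equal_solution := by
  intro lst _
  unfold Spec_solution solution solution_alt
  have h := outer_eq lst ((lst.length : Int) - 1).toNat 1 le_rfl rfl 0 PySem.Set.empty
    (by intro x; constructor
        · intro hx; exact absurd hx (by simp [PySem.Set.empty] at *)
        · rintro ⟨l, h0, h2, -⟩; omega)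
  simpa [psum, prefB] using h
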